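-- pv_equiv track=rewrite | github.com/DansonArnaud/Pieges-jeu-de-plateau--Python | main.py | horizontale
-- ===== SOURCE A (Python) =====
-- def horizontale(grille, direction, ligne):
--     """
--     Déplace les éléments d'une ligne vers la gauche ou la droite.
--
--     Args:
--         grille (list): La grille à modifier.
--         direction (str): "g" pour gauche, "d" pour droite.
--         ligne (int): Index de la ligne.
--
--     Returns:
--         list: La grille modifiée.
--
--     Doctests:
--     >>> grille = [[1, 2, 3],[4, 5, 6],[7, 8, 9]]
--     >>> horizontale(grille, "d", 1)
--     [[1, 2, 3], [6, 4, 5], [7, 8, 9]]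
--     """
--     taille = len(grille[ligne])
--     dernier = grille[ligne][-1]
--     premier = grille[ligne][0]
--     if direction == "d":
--         for i in range(taille - 1, 0, -1):
--             grille[ligne][i] = grille[ligne][i - 1]
--         grille[ligne][0] = dernier
--     elif direction == "g":
--         for i in range(taille - 1):
--             grille[ligne][i] = grille[ligne][i + 1]
--         grille[ligne][-1] = premier
--     return grille
-- ===== SOURCE B (Python) =====
-- def horizontale(grille, direction, ligne):
--     # Rotate the row by slice concatenation instead of an element-by-element
--     # shift loop; row[:] = ... keeps the in-place mutation of the inner list.
--     row = grille[ligne]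
--     if direction == "d":
--         row[:] = row[-1:] + row[:-1]
--     elif direction == "g":
--         row[:] = row[1:] + row[:1]
--     return grille
-- ===== Notes on version B (the rewrite author's own statement) =====
-- stated objective: simpler
-- what changed: Replaces the element-by-element in-place shift loops (plus saved first/last sentinels) with a single slice-concatenation rotation written back via slice assignment.
import Mathlib
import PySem

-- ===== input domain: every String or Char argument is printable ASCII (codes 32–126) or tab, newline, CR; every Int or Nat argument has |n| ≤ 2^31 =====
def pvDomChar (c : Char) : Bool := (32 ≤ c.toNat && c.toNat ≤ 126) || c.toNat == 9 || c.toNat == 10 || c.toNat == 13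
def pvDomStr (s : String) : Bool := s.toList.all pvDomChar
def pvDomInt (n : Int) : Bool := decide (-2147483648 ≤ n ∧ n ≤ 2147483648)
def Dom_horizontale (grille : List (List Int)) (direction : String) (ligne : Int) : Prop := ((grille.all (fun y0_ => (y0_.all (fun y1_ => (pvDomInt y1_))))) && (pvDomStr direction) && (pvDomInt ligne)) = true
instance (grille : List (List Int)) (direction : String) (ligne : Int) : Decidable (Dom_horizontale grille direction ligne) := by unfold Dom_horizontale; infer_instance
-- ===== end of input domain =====

-- B rotates the row by slice concatenation instead of an index shift loop (objective: simpler);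
-- both programs mutate grille's inner row in place in Python, the proof is about the return value.

-- ===== PORT A =====
def horizontale (grille : List (List Int)) (direction : String) (ligne : Int) : List (List Int) :=
  match PySem.List.pyGet? grille ligne with
  | none => grille  -- grille[ligne] raises IndexError: outside Pre_
  | some row =>
    match PySem.List.pyGet? row (-1), PySem.List.pyGet? row 0 with
    | some dernier, some premier =>
      let taille : Int := (row.length : Int)
      if direction == "d" then
        let row1 := (PySem.List.pyRange (taille - 1) 0 (-1)).foldl
          (fun r i => PySem.List.pySetD r i (PySem.List.pyGetD r (i - 1) 0)) row
        PySem.List.pySetD grille ligne (PySem.List.pySetD row1 0 dernier)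
      else if direction == "g" then
        let row1 := (PySem.List.pyRange 0 (taille - 1) 1).foldl
          (fun r i => PySem.List.pySetD r i (PySem.List.pyGetD r (i + 1) 0)) row
        PySem.List.pySetD grille ligne (PySem.List.pySetD row1 (-1) premier)
      else grille
    | _, _ => grille  -- empty row: grille[ligne][-1] raises IndexError; outside Pre_

-- ===== PORT B =====
def horizontale_alt (grille : List (List Int)) (direction : String) (ligne : Int) : List (List Int) :=
  match PySem.List.pyGet? grille ligne with
  | none => grille  -- grille[ligne] raises IndexError: outside Pre_
  | some row =>
    if direction == "d" then
      PySem.List.pySetD grille ligne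
        (PySem.List.slice row (some (-1)) none ++ PySem.List.slice row none (some (-1)))
    else if direction == "g" then
      PySem.List.pySetD grille ligne
        (PySem.List.slice row (some 1) none ++ PySem.List.slice row none (some 1))
    else grille

-- ===== PRECONDITION & SPEC =====
-- Pre_ excludes exactly the inputs on which A raises IndexError: ligne out of range, or an
-- in-range ligne whose row is empty (A raises at grille[ligne][-1]; B returns grille unchanged there).
def Pre_horizontale (grille : List (List Int)) (direction : String) (ligne : Int) : Prop :=
  PySem.Raise.InRange grille.length ligne ∧ PySem.List.pyGetD grille ligne [] ≠ []
instance (grille : List (List Int)) (direction : String) (ligne : Int) : Decidable (Pre_horizontale grille direction ligne) := by unfold Pre_horizontale; infer_instance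
def pvWitness_horizontale : List (List Int) × String × Int := ([[1, 2, 3], [4, 5, 6]], "d", 1)

def Spec_horizontale (grille : List (List Int)) (direction : String) (ligne : Int) (out : List (List Int)) : Prop := out = horizontale_alt grille direction ligne
instance (grille : List (List Int)) (direction : String) (ligne : Int) (out : List (List Int)) : Decidable (Spec_horizontale grille direction ligne out) := by unfold Spec_horizontale; infer_instance

-- ===== CLAIM (what is proved, stated in full; the proofs are below) =====
def Claim_equal_horizontale : Prop := ∀ (grille : List (List Int)) (direction : String) (ligne : Int), Dom_horizontale grille direction ligne → Pre_horizontale grille direction ligne → Spec_horizontale grille direction ligne (horizontale grille direction ligne)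

-- ===== LEMMAS AND PROOFS =====

-- A's right-shift loop: for i in range(len-1, 0, -1): r[i] = r[i-1], processed on body ++ fixed.
theorem foldD (body fixed : List Int) (hb : body ≠ []) :
    (PySem.List.pyRange ((body.length : Int) - 1) 0 (-1)).foldl
      (fun r i => PySem.List.pySetD r i (PySem.List.pyGetD r (i - 1) 0)) (body ++ fixed)
    = body.head hb :: (body.dropLast ++ fixed) := by
  induction body using List.reverseRecOn generalizing fixed with
  | nil => exact absurd rfl hb
  | append_singleton init x ih =>
    rcases eq_or_ne init [] with h0 | hne
    · subst h0; simp [PySem.List.pyRange_neg_one_eq_nil]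
    · have hl : (((init ++ [x]).length : Int)) - 1 = (init.length : Int) := by
        simp
      have hcast : (init.length : Int) - 1 = ((init.length - 1 : Nat) : Int) := by
        have : 1 ≤ init.length := List.length_pos_iff.mpr hne
        omega
      have hget : PySem.List.pyGetD ((init ++ [x]) ++ fixed) ((init.length : Int) - 1) 0
          = init.getLast hne := by
        rw [hcast, PySem.List.pyGetD_natCast, List.append_assoc]
        have hk : init.length - 1 < init.length := by
          have : 1 ≤ init.length := List.length_pos_iff.mpr hne
          omega
        rw [List.getD_eq_getElem?_getD, List.getElem?_append_left hk,
          List.getElem?_eq_getElem hk]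
        simp [List.getLast_eq_getElem]
      have hset : PySem.List.pySetD ((init ++ [x]) ++ fixed) (init.length : Int) (init.getLast hne)
          = init ++ (init.getLast hne :: fixed) := by
        rw [List.append_assoc, PySem.List.pySetD_natCast]
        simp
      rw [hl, PySem.List.pyRange_neg_one_cons (by exact_mod_cast List.length_pos_iff.mpr hne),
        List.foldl_cons, hget, hset, ih (init.getLast hne :: fixed) hne,
        List.head_append_left hne, List.dropLast_concat]
      have hjoin : init.dropLast ++ init.getLast hne :: fixed = init ++ fixed := by
        conv_rhs => rw [← List.dropLast_append_getLast hne]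
        simp
      rw [hjoin]

-- A's left-shift loop: for i in range(len-1): r[i] = r[i+1], processed on pre ++ body.
theorem foldG (pre body : List Int) (hb : body ≠ []) :
    (PySem.List.pyRange (pre.length : Int) ((pre.length : Int) + (body.length : Int) - 1) 1).foldl
      (fun r i => PySem.List.pySetD r i (PySem.List.pyGetD r (i + 1) 0)) (pre ++ body)
    = pre ++ (body.tail ++ [body.getLast hb]) := by
  induction body generalizing pre with
  | nil => exact absurd rfl hb
  | cons y tl ih =>
    rcases tl with _ | ⟨z, rest⟩
    · simp [PySem.List.pyRange_one_eq_nil]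
    · set tl := z :: rest with htl
      have htne : tl ≠ [] := by simp [htl]
      have hend : (pre.length : Int) + ((y :: tl).length : Int) - 1
          = ((pre ++ [z]).length : Int) + (tl.length : Int) - 1 := by
        simp [htl]; push_cast; ring
      have hcons : (pre.length : Int) < (pre.length : Int) + ((y :: tl).length : Int) - 1 := by
        simp [htl]; omega
      rw [PySem.List.pyRange_one_cons hcons, List.foldl_cons]
      have hget : PySem.List.pyGetD (pre ++ y :: tl) ((pre.length : Int) + 1) 0 = z := by
        rw [show (pre.length : Int) + 1 = ((pre.length + 1 : Nat) : Int) from by push_cast; ring,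
          PySem.List.pyGetD_natCast, List.getD_eq_getElem?_getD,
          List.getElem?_append_right (by omega)]
        simp [htl]
      have hset : PySem.List.pySetD (pre ++ y :: tl) (pre.length : Int) z
          = (pre ++ [z]) ++ tl := by
        rw [PySem.List.pySetD_natCast]
        simp
      rw [hget, hset]
      rw [show (pre.length : Int) + 1 = ((pre ++ [z]).length : Int) from by simp] at *
      rw [hend, ih (pre ++ [z]) htne]
      simp [htl]

-- ===== VERDICT (by name: the statement is the Claim_ definition above) =====
-- set last element: r[-1] = v
theorem pySetD_last (ys : List Int) (a v : Int) :
    PySem.List.pySetD (ys ++ [a]) (-1) v = ys ++ [v] := by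
  simp [PySem.List.pySetD, PySem.List.pySet?, PySem.List.pyIdx?, List.set_append]

theorem horizontale_spec : Claim_equal_horizontale := by
  intro g d l hdom hpre
  obtain ⟨hin, hrow⟩ := hpre
  unfold Spec_horizontale horizontale horizontale_alt
  cases hg : PySem.List.pyGet? g l with
  | none => exact absurd hin ((PySem.List.pyGet?_eq_none_iff g l).mp hg)
  | some row =>
    have hne : row ≠ [] := by
      have h : PySem.List.pyGetD g l [] = row := by
        rw [show PySem.List.pyGetD g l [] = (PySem.List.pyGet? g l).getD [] from rfl, hg]
        rfl
      rwa [h] at hrow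
    have h1 : PySem.List.pyGet? row (-1) = some (row.getLast hne) := by
      rw [PySem.List.pyGet?_neg_one, List.getLast?_eq_some_getLast]
    have h2 : PySem.List.pyGet? row 0 = some (row.head hne) := by
      rw [PySem.List.pyGet?_zero]
      rcases row with _ | ⟨a, t⟩
      · exact absurd rfl hne
      · rfl
    simp only [h1, h2]
    by_cases hd : d = "d"
    · subst hd
      have hfold := foldD row [] hne
      simp only [List.append_nil] at hfold
      have hA : PySem.List.pySetD (row.head hne :: row.dropLast) 0 (row.getLast hne)
          = row.getLast hne :: row.dropLast := by
        rw [PySem.List.pySetD_of_nonneg _ _ (by norm_num)]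
        simp
      have hB : PySem.List.slice row (some (-1)) none ++ PySem.List.slice row none (some (-1))
          = row.getLast hne :: row.dropLast := by
        rw [PySem.List.slice_from_neg_one, PySem.List.slice_to_neg_one,
          List.drop_length_sub_one hne]
        rfl
      simp only [beq_self_eq_true, if_true]
      rw [hfold, hA, hB]
    · by_cases hgdir : d = "g"
      · subst hgdir
        have hfold := foldG [] row hne
        simp only [List.nil_append, List.length_nil, Nat.cast_zero, zero_add] at hfold
        have hA : PySem.List.pySetD (row.tail ++ [row.getLast hne]) (-1) (row.head hne)
            = row.tail ++ [row.head hne] := pySetD_last _ _ _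
        have hB : PySem.List.slice row (some 1) none ++ PySem.List.slice row none (some 1)
            = row.tail ++ [row.head hne] := by
          rw [PySem.List.slice_from_one,
            show (1 : Int) = ((1 : Nat) : Int) from rfl, PySem.List.slice_to_natCast]
          congr 1
          rcases row with _ | ⟨a, t⟩
          · exact absurd rfl hne
          · rfl
        simp only [show (("g" : String) == "d") = false from by decide, Bool.false_eq_true,
          if_false, beq_self_eq_true, if_true]
        rw [hfold, hA, hB]
      · have e1 : (d == "d") = false := by simp [hd]
        have e2 : (d == "g") = false := by simp [hgdir]
        simp only [e1, e2, Bool.false_eq_true, if_false]
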